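-- pv_equiv track=rewrite | github.com/Coinplus/cryptolib | src/cryptolib/reedsolom_base58.py | rs_find_errors
-- ===== SOURCE A (Python) =====
-- N = 59
--
-- class ReedSolomonError(Exception):
--     pass
--
-- def gf_pow(value, power):
--     return (pow(value, power) % N)
--
-- def gf_poly_eval(coefs1, x):
--     val = coefs1[0]
--     for c in coefs1[1:]:
--         val = (val*x + c) % N
--     return val
--
-- def rs_find_errors(err_loc, nmess, generator=2):
--     '''Find the roots (ie, where evaluation = zero) of error polynomial by bruteforce trial, this is a sort of Chien's search (but less efficient, Chien's search is a way to evaluate the polynomial such that each evaluation only takes constant time).'''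
--     # nmess = length of whole codeword (message + ecc symbols)
--     errs = len(err_loc) - 1
--     err_pos = []
--     for i in range(nmess): # normally we should try all 2^8 possible values, but here we optimize to just check the interesting symbols
--         if gf_poly_eval(err_loc, gf_pow(generator, i)) == 0: # It's a 0? Bingo, it's a root of the error locator polynomial, in other terms this is the location of an error
--             err_pos.append(nmess - 1 - i)
--     # Sanity check: the number of errors/errata positions found should be exactly the same as the length of the errata locator polynomial
--     if len(err_pos) != errs:
--         # TODO: to decode messages+ecc with length n > 255, we may try to use a bruteforce approach: the correct positions ARE in the final array j, but the problem is because we are above the Galois Field's range, there is a wraparound so that for example if j should be [0, 1, 2, 3], we will also get [255, 256, 257, 258] (because 258 % 255 == 3, same for the other values), so we can't discriminate. The issue is that fixing any errs_nb errors among those will always give a correct output message (in the sense that the syndrome will be all 0), so we may not even be able to check if that's correct or not, so I'm not sure the bruteforce approach may even be possible.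
--         raise ReedSolomonError("Too many (or few) errors found by Chien Search for the errata locator polynomial!")
--     return err_pos
-- ===== SOURCE B (Python) =====
-- N = 59
--
-- class ReedSolomonError(Exception):
--     pass
--
-- def rs_find_errors(err_loc, nmess, generator=2):
--     '''True Chien search: carry a term vector t with t[k] ~ err_loc[k]*generator^(i*(errs-k)) mod N,
--     so each position is tested in O(len) additions instead of re-evaluating the polynomial with a
--     fresh (unbounded) pow at every step.'''
--     errs = len(err_loc) - 1
--     t = [c % N for c in err_loc]
--     mults = [pow(generator, errs - k, N) for k in range(len(err_loc))]
--     err_pos = []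
--     for i in range(nmess):
--         if sum(t) % N == 0:
--             err_pos.append(nmess - 1 - i)
--         t = [(tv * m) % N for tv, m in zip(t, mults)]
--     if len(err_pos) != errs:
--         raise ReedSolomonError("Too many (or few) errors found by Chien Search for the errata locator polynomial!")
--     return err_pos
-- ===== Notes on version B (the rewrite author's own statement) =====
-- stated objective: faster
-- what changed: Replaces per-position polynomial re-evaluation (Horner with a fresh unbounded pow(generator,i) at every step) by a true Chien search carrying a per-coefficient term vector that is updated multiplicatively mod 59, so each position costs O(len(err_loc)) small-integer operations and no big-integer powers are ever formed.
-- outside the precondition, e.g. on rs_find_errors([59], 1, 2): A returns [], B raises ReedSolomonError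
import Mathlib
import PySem

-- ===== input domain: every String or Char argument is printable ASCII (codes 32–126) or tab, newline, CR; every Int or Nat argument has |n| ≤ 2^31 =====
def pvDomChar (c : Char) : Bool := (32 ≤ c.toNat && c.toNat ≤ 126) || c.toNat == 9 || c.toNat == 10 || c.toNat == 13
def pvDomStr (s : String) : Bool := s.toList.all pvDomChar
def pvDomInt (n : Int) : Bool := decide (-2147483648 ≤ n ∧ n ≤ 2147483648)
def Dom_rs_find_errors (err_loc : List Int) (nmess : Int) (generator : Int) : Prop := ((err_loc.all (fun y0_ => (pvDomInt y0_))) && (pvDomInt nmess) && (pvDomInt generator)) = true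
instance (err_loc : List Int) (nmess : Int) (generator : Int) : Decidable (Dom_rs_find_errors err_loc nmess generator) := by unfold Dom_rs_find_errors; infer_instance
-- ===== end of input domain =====

-- B replaces A's per-position Horner re-evaluation with unbounded pow(generator,i) by a true
-- Chien search carrying a term vector updated multiplicatively mod 59 (faster; return value only —
-- where Python A raises, both ports return [] and those inputs are excluded by Pre_).

-- ===== PORT A =====
-- pow(value, power) % N; every call site passes power = i ≥ 0 from range, so .toNat is exact there
def gf_pow (value : Int) (power : Int) : Int :=
  PySem.Int.mod (value ^ power.toNat) 59

def gf_poly_eval (coefs1 : List Int) (x : Int) : Int :=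
  match coefs1 with
  | [] => 0  -- Python raises IndexError on coefs1[0]; excluded by Pre_
  | v :: rest => rest.foldl (fun val c => PySem.Int.mod (val * x + c) 59) v

def rs_find_errors (err_loc : List Int) (nmess : Int) (generator : Int) : List Int :=
  let errs : Int := (err_loc.length : Int) - 1
  let err_pos : List Int :=
    (PySem.List.pyRange 0 nmess 1).foldl
      (fun acc i => if gf_poly_eval err_loc (gf_pow generator i) = 0
                    then acc ++ [nmess - 1 - i] else acc) []
  if (err_pos.length : Int) ≠ errs then []  -- Python raises ReedSolomonError; excluded by Pre_
  else err_pos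

-- ===== PORT B =====
def rs_find_errors_alt (err_loc : List Int) (nmess : Int) (generator : Int) : List Int :=
  let errs : Int := (err_loc.length : Int) - 1
  let t0 : List Int := err_loc.map (fun c => PySem.Int.mod c 59)
  -- pow(generator, errs - k, 59); errs - k ≥ 0 for k in range(len(err_loc)), so .toNat is exact
  let mults : List Int :=
    (PySem.List.pyRange 0 (err_loc.length : Int) 1).map
      (fun k => PySem.Int.powMod generator ((err_loc.length : Int) - 1 - k).toNat 59)
  let res : List Int × List Int :=
    (PySem.List.pyRange 0 nmess 1).foldl
      (fun (st : List Int × List Int) i =>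
        (if PySem.Int.mod st.2.sum 59 = 0 then st.1 ++ [nmess - 1 - i] else st.1,
         List.zipWith (fun tv mu => PySem.Int.mod (tv * mu) 59) st.2 mults))
      ([], t0)
  if (res.1.length : Int) ≠ errs then []  -- Python raises ReedSolomonError; excluded by Pre_
  else res.1

-- ===== PRECONDITION & SPEC =====
-- gsum y i L = Σ_k L[k] * y^(i*(len-1-k)) : the polynomial written as a monomial sum
def gsum (y : Int) (i : Nat) : List Int → Int
  | [] => 0
  | c :: cs => c * y ^ (i * cs.length) + gsum y i cs

def pvRootAt (L : List Int) (g : Int) (i : Int) : Bool :=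
  PySem.Int.mod (gsum (PySem.Int.powMod g i.toNat 59) 1 L) 59 == 0

-- number of i in [0, nmess) with locator(generator^i) ≡ 0 (mod 59), computed through the
-- period-58 structure of generator^i mod 59 (Fermat), so it evaluates fast for any nmess
def rootCount (L : List Int) (nmess g : Int) : Int :=
  if nmess ≤ 0 then 0
  else if PySem.Int.mod g 59 == 0 then
    (if pvRootAt L g 0 then 1 else 0)
      + (if PySem.Int.mod (gsum 0 1 L) 59 == 0 then nmess - 1 else 0)
  else
    PySem.Int.floordiv nmess 58 * ((List.range 58).countP (fun i => pvRootAt L g (i : Int)) : Int)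
      + ((List.range (PySem.Int.mod nmess 58).toNat).countP (fun i => pvRootAt L g (i : Int)) : Int)

-- Pre_ excludes exactly the inputs where A raises (empty err_loc: IndexError; number of roots of the
-- locator among generator^0..generator^(nmess-1) different from len(err_loc)-1: ReedSolomonError),
-- plus the degenerate single-coefficient err_loc whose coefficient is a nonzero multiple of 59 with
-- nmess ≥ 1, where A's unreduced Horner value returns [] while B's modular evaluation raises.
def Pre_rs_find_errors (err_loc : List Int) (nmess : Int) (generator : Int) : Prop :=
  err_loc ≠ [] ∧
  (err_loc.length = 1 → (nmess ≤ 0 ∨ PySem.Int.mod (err_loc.headD 0) 59 ≠ 0)) ∧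
  (2 ≤ err_loc.length →
    rootCount err_loc nmess generator = (err_loc.length : Int) - 1)

instance (err_loc : List Int) (nmess : Int) (generator : Int) : Decidable (Pre_rs_find_errors err_loc nmess generator) := by unfold Pre_rs_find_errors; infer_instance

def pvWitness_rs_find_errors : List Int × Int × Int := ([1, 58], 1, 2)

def Spec_rs_find_errors (err_loc : List Int) (nmess : Int) (generator : Int) (out : List Int) : Prop := out = rs_find_errors_alt err_loc nmess generator
instance (err_loc : List Int) (nmess : Int) (generator : Int) (out : List Int) : Decidable (Spec_rs_find_errors err_loc nmess generator out) := by unfold Spec_rs_find_errors; infer_instance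

-- ===== CLAIM (what is proved, stated in full; the proofs are below) =====
def Claim_equal_rs_find_errors : Prop := ∀ (err_loc : List Int) (nmess : Int) (generator : Int), Dom_rs_find_errors err_loc nmess generator → Pre_rs_find_errors err_loc nmess generator → Spec_rs_find_errors err_loc nmess generator (rs_find_errors err_loc nmess generator)

-- ===== LEMMAS AND PROOFS =====

lemma pmod59 (x : Int) : PySem.Int.mod x 59 = x % 59 :=
  PySem.Int.mod_eq_emod_of_pos (by norm_num)

-- closed form of B's carried term vector after i steps
def tvec (g : Int) (i : Nat) : List Int → List Int
  | [] => []
  | c :: cs => (c * g ^ (i * cs.length)) % 59 :: tvec g i cs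

-- closed form of B's multiplier vector
def mvec (g : Int) : List Int → List Int
  | [] => []
  | _ :: cs => g ^ cs.length % 59 :: mvec g cs

lemma t0_eq (g : Int) (L : List Int) :
    L.map (fun c => PySem.Int.mod c 59) = tvec g 0 L := by
  have hf : (fun c : Int => PySem.Int.mod c 59) = (fun c : Int => c % 59) := funext pmod59
  rw [hf]
  induction L with
  | nil => rfl
  | cons c cs ih => simp [tvec, ih]

lemma mvec_eq_range (g : Int) : ∀ (L : List Int),
    (List.range L.length).map (fun k => g ^ (L.length - 1 - k) % 59) = mvec g L
  | [] => rfl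
  | c :: cs => by
    rw [List.length_cons, List.range_succ_eq_map, List.map_cons, List.map_map]
    have hfun : ((fun k => g ^ (cs.length + 1 - 1 - k) % 59) ∘ Nat.succ)
        = (fun k => g ^ (cs.length - 1 - k) % 59) := by
      funext k
      simp only [Function.comp]
      congr 2
      omega
    rw [hfun, mvec_eq_range g cs]
    simp [mvec]

lemma mults_eq (g : Int) (L : List Int) :
    (PySem.List.pyRange 0 (L.length : Int) 1).map
      (fun k => PySem.Int.powMod g ((L.length : Int) - 1 - k).toNat 59) = mvec g L := by
  rw [PySem.List.pyRange_one, List.map_map]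
  have hlen : ((L.length : Int) - 0).toNat = L.length := by omega
  rw [hlen]
  have hfun : ∀ k ∈ List.range L.length,
      ((fun k => PySem.Int.powMod g ((L.length : Int) - 1 - k).toNat 59) ∘ (fun k : Nat => (0 : Int) + ↑k)) k
        = g ^ (L.length - 1 - k) % 59 := by
    intro k hk
    have hk' : k < L.length := List.mem_range.1 hk
    simp only [Function.comp]
    rw [PySem.Int.powMod_eq_emod g _ (by norm_num)]
    congr 2
    omega
  rw [List.map_congr_left hfun, mvec_eq_range]

lemma chienStep_tvec (g : Int) (i : Nat) (L : List Int) :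
    List.zipWith (fun tv mu => PySem.Int.mod (tv * mu) 59) (tvec g i L) (mvec g L)
      = tvec g (i + 1) L := by
  have hf : (fun tv mu : Int => PySem.Int.mod (tv * mu) 59) = (fun tv mu : Int => tv * mu % 59) :=
    funext fun a => funext fun b => pmod59 _
  rw [hf]
  induction L with
  | nil => rfl
  | cons c cs ih =>
    simp only [tvec, mvec, List.zipWith_cons_cons, ih]
    congr 1
    rw [← Int.mul_emod]
    rw [show (i + 1) * cs.length = i * cs.length + cs.length by ring, pow_add, mul_assoc]

lemma tvec_sum (g : Int) (i : Nat) (L : List Int) :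
    (tvec g i L).sum % 59 = gsum g i L % 59 := by
  induction L with
  | nil => rfl
  | cons c cs ih =>
    simp only [tvec, gsum, List.sum_cons]
    rw [Int.add_emod, Int.emod_emod_of_dvd _ (dvd_refl (59 : Int)), ih, ← Int.add_emod]

lemma gsum_pow (g : Int) (i : Nat) (L : List Int) : gsum (g ^ i) 1 L = gsum g i L := by
  induction L with
  | nil => rfl
  | cons c cs ih => simp only [gsum, ih, Nat.one_mul, ← pow_mul]

lemma gsum_base_cong {y y' : Int} (h : y % 59 = y' % 59) (L : List Int) :
    gsum y 1 L % 59 = gsum y' 1 L % 59 := by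
  induction L with
  | nil => rfl
  | cons c cs ih =>
    simp only [gsum]
    exact Int.ModEq.add (Int.ModEq.mul_left c (Int.ModEq.pow _ h)) ih

lemma foldl_horner_pure (x : Int) (L : List Int) : ∀ v : Int,
    L.foldl (fun val c => val * x + c) v = gsum x 1 (v :: L) := by
  induction L with
  | nil => intro v; simp [gsum]
  | cons d cs ih =>
    intro v
    rw [List.foldl_cons, ih]
    simp only [gsum, Nat.one_mul, List.length_cons]
    rw [pow_succ]
    ring

lemma foldl_horner_mod (x : Int) (L : List Int) : ∀ v v' : Int, v % 59 = v' % 59 →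
    L.foldl (fun val c => (val * x + c) % 59) v % 59
      = L.foldl (fun val c => val * x + c) v' % 59 := by
  induction L with
  | nil => intro v v' h; exact h
  | cons d cs ih =>
    intro v v' h
    simp only [List.foldl_cons]
    apply ih
    rw [Int.emod_emod_of_dvd _ (dvd_refl (59 : Int))]
    exact Int.ModEq.add_right d (Int.ModEq.mul_right x h)

lemma foldl_horner_mod_self (x : Int) : ∀ (L : List Int), L ≠ [] → ∀ v : Int,
    L.foldl (fun val c => (val * x + c) % 59) v % 59
      = L.foldl (fun val c => (val * x + c) % 59) v
  | [], h, _ => absurd rfl h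
  | [d], _, v => by
    show (v * x + d) % 59 % 59 = (v * x + d) % 59
    exact Int.emod_emod_of_dvd _ (dvd_refl (59 : Int))
  | d :: e :: cs, _, v => by
    simp only [List.foldl_cons]
    exact foldl_horner_mod_self x (e :: cs) (by simp) _

lemma gf_eval_eq : ∀ (L : List Int), 2 ≤ L.length → ∀ x : Int,
    gf_poly_eval L x = gsum x 1 L % 59
  | c :: d :: cs, _, x => by
    show (d :: cs).foldl (fun val e => PySem.Int.mod (val * x + e) 59) c = _
    simp only [pmod59]
    rw [← foldl_horner_mod_self x (d :: cs) (by simp) c]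
    rw [foldl_horner_mod x (d :: cs) c c rfl, foldl_horner_pure]

lemma eval_value_eq (L : List Int) (g i : Int) (h2 : 2 ≤ L.length) :
    gf_poly_eval L (gf_pow g i) = gsum g i.toNat L % 59 := by
  rw [gf_eval_eq L h2]
  rw [show gf_pow g i = g ^ i.toNat % 59 from by simp [gf_pow]]
  rw [gsum_base_cong (Int.emod_emod_of_dvd _ (dvd_refl (59 : Int))) L, gsum_pow]

lemma bloop_char (L : List Int) (g nmess : Int) (m : Nat) :
    (PySem.List.pyRange 0 (m : Int) 1).foldl
      (fun (st : List Int × List Int) i =>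
        (if PySem.Int.mod st.2.sum 59 = 0 then st.1 ++ [nmess - 1 - i] else st.1,
         List.zipWith (fun tv mu => PySem.Int.mod (tv * mu) 59) st.2 (mvec g L)))
      ([], tvec g 0 L)
    = (((PySem.List.pyRange 0 (m : Int) 1).filter
          (fun i => decide (gsum g i.toNat L % 59 = 0))).map (fun i => nmess - 1 - i),
       tvec g m L) := by
  induction m with
  | zero =>
    rw [show ((0 : Nat) : Int) = 0 by rfl, PySem.List.pyRange_one_eq_nil (le_refl 0)]
    rfl
  | succ m ih =>
    have hcast : ((m + 1 : Nat) : Int) = (m : Int) + 1 := by push_cast; ring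
    rw [hcast, PySem.List.pyRange_one_succ_right (Int.natCast_nonneg m)]
    rw [List.foldl_append, ih, List.filter_append, List.map_append]
    simp only [List.foldl_cons, List.foldl_nil, List.filter_cons, List.filter_nil]
    rw [pmod59, tvec_sum, chienStep_tvec]
    by_cases hroot : gsum g m L % 59 = 0
    · simp [hroot, Int.toNat_natCast]
    · simp [hroot, Int.toNat_natCast]

-- ===== VERDICT (by name: the statement is the Claim_ definition above) =====
theorem rs_find_errors_spec : Claim_equal_rs_find_errors := by
  intro L nmess g _ hpre
  unfold Spec_rs_find_errors
  obtain ⟨hne, h1, _⟩ := hpre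
  simp only [rs_find_errors, rs_find_errors_alt]
  rw [t0_eq g, PySem.List.foldl_append_ite
      (p := fun i => gf_poly_eval L (gf_pow g i) = 0) (f := fun i => nmess - 1 - i)]
  simp only [mults_eq]
  by_cases hn : nmess ≤ 0
  · rw [PySem.List.pyRange_one_eq_nil hn]
    simp
  · have hm : nmess = ((nmess.toNat : Nat) : Int) := (Int.toNat_of_nonneg (by omega)).symm
    rw [hm, bloop_char]
    match L, hne with
    | [h], _ =>
      rcases h1 rfl with hn0 | hh
      · omega
      · rw [pmod59] at hh
        have hh0 : h ≠ 0 := by intro h0; rw [h0] at hh; exact hh (Int.zero_emod 59)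
        have hA : (PySem.List.pyRange 0 ((nmess.toNat : Nat) : Int) 1).filter
            (fun i => decide (gf_poly_eval [h] (gf_pow g i) = 0)) = [] := by
          rw [List.filter_eq_nil_iff]
          intro i _
          simpa [gf_poly_eval] using hh0
        have hB : (PySem.List.pyRange 0 ((nmess.toNat : Nat) : Int) 1).filter
            (fun i => decide (gsum g i.toNat [h] % 59 = 0)) = [] := by
          rw [List.filter_eq_nil_iff]
          intro i _
          simpa [gsum] using hh
        rw [hA, hB]
        simp
    | c :: d :: cs, _ =>
      have hfilter : (PySem.List.pyRange 0 ((nmess.toNat : Nat) : Int) 1).filter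
            (fun i => decide (gf_poly_eval (c :: d :: cs) (gf_pow g i) = 0))
          = (PySem.List.pyRange 0 ((nmess.toNat : Nat) : Int) 1).filter
            (fun i => decide (gsum g i.toNat (c :: d :: cs) % 59 = 0)) := by
        apply List.filter_congr
        intro i _
        rw [eval_value_eq (c :: d :: cs) g i (by simp)]
      rw [hfilter]
      simp
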